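-- pv_equiv track=rewrite | github.com/Joshhh0908/CAD_diagnosis-master | test_nnunetseg_50_600_z_lse_r2.py | get_labeled_segments
-- ===== SOURCE A (Python) =====
-- def get_labeled_segments(label_array):
--     """
--     Return list of (start, end, label) for each contiguous run of the SAME
--     non-zero label value.
--
--     Adjacent segments with DIFFERENT labels are treated as separate lesions,
--     matching the original annotation format where each (start, end, label)
--     triplet in the CSV is one independent lesion entry.
--
--     Example:
--         [0, 0, 1, 1, 2, 2, 0]  ->  [(2, 3, 1), (4, 5, 2)]  # two lesions
--         [0, 0, 1, 1, 1, 1, 0]  ->  [(2, 5, 1)]              # one lesion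
--     """
--     segments = []
--     in_seg = False
--     current_label = 0
--     start = 0
--     for i, v in enumerate(label_array):
--         v = int(v)
--         if v != 0 and not in_seg:
--             start, in_seg, current_label = i, True, v
--         elif v != 0 and in_seg and v != current_label:
--             # label changed -> close current, open new
--             segments.append((start, i - 1, current_label))
--             start, current_label = i, v
--         elif v == 0 and in_seg:
--             segments.append((start, i - 1, current_label))
--             in_seg = False
--     if in_seg:
--         segments.append((start, len(label_array) - 1, current_label))
--     return segments
-- ===== SOURCE B (Python) =====
-- def get_labeled_segments(label_array):
--     vals = [int(v) for v in label_array]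
--     segments = []
--     n = len(vals)
--     i = 0
--     while i < n:
--         j = i + 1
--         while j < n and vals[j] == vals[i]:
--             j += 1
--         if vals[i] != 0:
--             segments.append((i, j - 1, vals[i]))
--         i = j
--     return segments
-- ===== Notes on version B (the rewrite author's own statement) =====
-- stated objective: alternative
-- what changed: Replaces A's in_seg/start/current_label state machine over single elements by a run-at-a-time two-pointer scan that finds each maximal run of equal values with an inner scan and emits it at once if non-zero.
import Mathlib
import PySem

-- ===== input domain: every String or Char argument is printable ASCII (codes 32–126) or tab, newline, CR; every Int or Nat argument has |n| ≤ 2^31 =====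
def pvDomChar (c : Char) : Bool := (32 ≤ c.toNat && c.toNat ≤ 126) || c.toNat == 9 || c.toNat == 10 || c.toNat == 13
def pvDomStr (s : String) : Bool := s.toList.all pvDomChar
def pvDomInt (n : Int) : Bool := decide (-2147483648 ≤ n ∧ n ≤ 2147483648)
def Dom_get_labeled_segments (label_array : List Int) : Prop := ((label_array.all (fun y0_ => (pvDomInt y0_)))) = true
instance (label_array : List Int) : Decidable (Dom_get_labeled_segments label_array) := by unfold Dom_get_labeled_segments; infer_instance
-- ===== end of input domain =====

-- B replaces A's per-element in_seg/start/current_label state machine by a run-at-a-time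
-- two-pointer scan (alternative decomposition, same O(n) cost).


-- ===== PORT A =====
-- state = (segments, in_seg, current_label, start, i); i is the enumerate counter
def pvStep (st : List (Int × Int × Int) × Bool × Int × Int × Int) (v : Int) :
    List (Int × Int × Int) × Bool × Int × Int × Int :=
  let segments := st.1
  let in_seg := st.2.1
  let current_label := st.2.2.1
  let start := st.2.2.2.1
  let i := st.2.2.2.2
  if v ≠ 0 ∧ in_seg = false then (segments, true, v, i, i + 1)
  else if v ≠ 0 ∧ in_seg = true ∧ v ≠ current_label then
    (segments ++ [(start, i - 1, current_label)], true, v, i, i + 1)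
  else if v = 0 ∧ in_seg = true then
    (segments ++ [(start, i - 1, current_label)], false, current_label, start, i + 1)
  else (segments, in_seg, current_label, start, i + 1)

-- the trailing 'if in_seg: segments.append((start, len(label_array)-1, current_label))'
def pvFin (n : Int) (st : List (Int × Int × Int) × Bool × Int × Int × Int) :
    List (Int × Int × Int) :=
  if st.2.1 = true then st.1 ++ [(st.2.2.2.1, n - 1, st.2.2.1)] else st.1

def get_labeled_segments (label_array : List Int) : List (Int × Int × Int) :=
  pvFin (label_array.length : Int)
    (label_array.foldl pvStep ([], false, 0, 0, (0 : Int)))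

-- ===== PORT B =====
-- run-at-a-time scan: the inner 'while vals[j]==vals[i]' is the takeWhile/dropWhile split
def pvAltGo (idx : Int) (l : List Int) : List (Int × Int × Int) :=
  match l with
  | [] => []
  | v :: rest =>
    let len : Int := 1 + ((rest.takeWhile (fun w => w == v)).length : Int)
    let tail := rest.dropWhile (fun w => w == v)
    (if v ≠ 0 then [(idx, idx + len - 1, v)] else []) ++ pvAltGo (idx + len) tail
termination_by l.length
decreasing_by
  simpa using Nat.lt_succ_of_le (List.length_dropWhile_le (fun w => w == v) rest)

def get_labeled_segments_alt (label_array : List Int) : List (Int × Int × Int) :=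
  pvAltGo 0 label_array

-- ===== PRECONDITION & SPEC =====
def Spec_get_labeled_segments (label_array : List Int) (out : List (Int × Int × Int)) : Prop := out = get_labeled_segments_alt label_array
instance (label_array : List Int) (out : List (Int × Int × Int)) : Decidable (Spec_get_labeled_segments label_array out) := by unfold Spec_get_labeled_segments; infer_instance

-- ===== CLAIM (what is proved, stated in full; the proofs are below) =====
def Claim_equal_get_labeled_segments : Prop := ∀ (label_array : List Int), Dom_get_labeled_segments label_array → Spec_get_labeled_segments label_array (get_labeled_segments label_array)

-- ===== LEMMAS AND PROOFS =====

-- what A's loop computes from an open segment (current run of label cl started at 'start')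
def pvOpenGo (start cl i : Int) (l : List Int) : List (Int × Int × Int) :=
  let len : Int := ((l.takeWhile (fun w => w == cl)).length : Int)
  (start, i + len - 1, cl) :: pvAltGo (i + len) (l.dropWhile (fun w => w == cl))

lemma pvAltGo_congr (i j : Int) (l : List Int) (h : i = j) : pvAltGo i l = pvAltGo j l := by
  rw [h]

lemma pvAltGo_zero (i : Int) (rest : List Int) :
    pvAltGo i (0 :: rest) = pvAltGo (i + 1) rest := by
  match rest with
  | [] => simp [pvAltGo]
  | w :: rest' =>
    by_cases hw : w = 0
    · subst hw
      rw [pvAltGo, pvAltGo]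
      simp only [List.takeWhile_cons, List.dropWhile_cons, beq_iff_eq, if_pos rfl,
        ne_eq, not_true_eq_false, if_false, List.nil_append, List.length_cons]
      exact pvAltGo_congr _ _ _ (by push_cast [List.length_cons]; ring)
    · rw [pvAltGo]
      simp only [List.takeWhile_cons, List.dropWhile_cons, beq_iff_eq, if_neg hw,
        ne_eq, not_true_eq_false, if_false, List.nil_append, List.length_nil]
      exact pvAltGo_congr _ _ _ (by push_cast [List.length_cons]; ring)

lemma pvAltGo_cons_nz (i v : Int) (rest : List Int) (hv : v ≠ 0) :
    pvAltGo i (v :: rest) = pvOpenGo i v (i + 1) rest := by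
  rw [pvAltGo, pvOpenGo]
  simp only [ne_eq, hv, not_false_eq_true, if_true, List.singleton_append]
  refine congrArg₂ _ (by push_cast [List.length_cons]; ring_nf) ?_
  exact pvAltGo_congr _ _ _ (by push_cast [List.length_cons]; ring)

lemma pvOpenGo_same (start cl i : Int) (rest : List Int) :
    pvOpenGo start cl i (cl :: rest) = pvOpenGo start cl (i + 1) rest := by
  rw [pvOpenGo, pvOpenGo]
  simp only [List.takeWhile_cons, List.dropWhile_cons, beq_iff_eq, if_pos rfl,
    List.length_cons]
  refine congrArg₂ _ (by push_cast [List.length_cons]; ring_nf) ?_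
  exact pvAltGo_congr _ _ _ (by push_cast [List.length_cons]; ring)

lemma pvOpenGo_other (start cl i v : Int) (rest : List Int) (hvc : v ≠ cl) :
    pvOpenGo start cl i (v :: rest) = (start, i - 1, cl) :: pvAltGo i (v :: rest) := by
  rw [pvOpenGo]
  simp only [List.takeWhile_cons, List.dropWhile_cons, beq_iff_eq, if_neg hvc,
    List.length_nil, Int.natCast_zero, add_zero]

lemma pvMain (l : List Int) :
    (∀ segs cl start i n, n = i + (l.length : Int) →
      pvFin n (l.foldl pvStep (segs, false, cl, start, i)) = segs ++ pvAltGo i l)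
    ∧ (∀ segs cl start i n, cl ≠ 0 → n = i + (l.length : Int) →
      pvFin n (l.foldl pvStep (segs, true, cl, start, i)) = segs ++ pvOpenGo start cl i l) := by
  induction l with
  | nil =>
    constructor
    · intro segs cl start i n _
      simp [pvFin, pvAltGo]
    · intro segs cl start i n _ hn
      simp only [List.length_nil] at hn
      simp [pvFin, pvOpenGo, pvAltGo, hn]
  | cons v rest ih =>
    constructor
    · intro segs cl start i n hn
      simp only [List.length_cons] at hn
      by_cases hv : v = 0
      · subst hv
        rw [List.foldl_cons]
        have hstep : pvStep (segs, false, cl, start, i) 0 = (segs, false, cl, start, i + 1) := by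
          simp [pvStep]
        rw [hstep, ih.1 segs cl start (i + 1) n (by push_cast at hn ⊢; omega),
          pvAltGo_zero]
      · rw [List.foldl_cons]
        have hstep : pvStep (segs, false, cl, start, i) v = (segs, true, v, i, i + 1) := by
          simp [pvStep, hv]
        rw [hstep, ih.2 segs v i (i + 1) n hv (by push_cast at hn ⊢; omega),
          pvAltGo_cons_nz i v rest hv]
    · intro segs cl start i n hcl hn
      simp only [List.length_cons] at hn
      by_cases hv : v = 0
      · subst hv
        rw [List.foldl_cons]
        have hstep : pvStep (segs, true, cl, start, i) 0 =
            (segs ++ [(start, i - 1, cl)], false, cl, start, i + 1) := by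
          simp [pvStep, Ne.symm hcl]
        rw [hstep, ih.1 (segs ++ [(start, i - 1, cl)]) cl start (i + 1) n
          (by push_cast at hn ⊢; omega)]
        rw [pvOpenGo]
        simp only [List.takeWhile_cons, List.dropWhile_cons, beq_iff_eq,
          if_neg (Ne.symm hcl), List.length_nil, Int.natCast_zero, add_zero,
          List.append_assoc, List.singleton_append]
        rw [pvAltGo_zero]
      · by_cases hvc : v = cl
        · subst hvc
          rw [List.foldl_cons]
          have hstep : pvStep (segs, true, v, start, i) v = (segs, true, v, start, i + 1) := by
            simp [pvStep, hv]
          rw [hstep, ih.2 segs v start (i + 1) n hcl (by push_cast at hn ⊢; omega),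
            pvOpenGo_same]
        · rw [List.foldl_cons]
          have hstep : pvStep (segs, true, cl, start, i) v =
              (segs ++ [(start, i - 1, cl)], true, v, i, i + 1) := by
            simp [pvStep, hv, hvc]
          rw [hstep, ih.2 (segs ++ [(start, i - 1, cl)]) v i (i + 1) n hv
            (by push_cast at hn ⊢; omega)]
          rw [pvOpenGo_other start cl i v rest hvc, pvAltGo_cons_nz i v rest hv]
          simp

-- ===== VERDICT (by name: the statement is the Claim_ definition above) =====
theorem get_labeled_segments_spec : Claim_equal_get_labeled_segments := by
  intro l _
  unfold Spec_get_labeled_segments get_labeled_segments get_labeled_segments_alt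
  simpa using (pvMain l).1 [] 0 0 0 (l.length : Int) (by simp)
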